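-- pv_equiv track=rewrite | github.com/Blue-Cheesecake/_-Depreciated-_My-Playground | Intermediete/Test_LeastNumber.py | Solution
-- ===== SOURCE A (Python) =====
-- def Solution(arr=list, k=int):
--     freq = {}
--     for i in arr:
--         if i not in freq:
--             freq[i] = 1
--         else:
--             freq[i] += 1
--     order = sorted(freq.items(), key=lambda kv: kv[1])
--     output = 0
--     end = False
--     for i in range(len(order)):
--         item = list(order[i])
--         while item[1] > 0:
--             if k > 0:
--                 item[1] -= 1
--                 k -= 1
--             else:
--                 output = len(order[i:])
--                 end = True
--                 break
--         if end:
--             break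
--
--     return output
-- ===== SOURCE B (Python) =====
-- def Solution(arr=list, k=int):
--     freq = {}
--     for i in arr:
--         freq[i] = freq.get(i, 0) + 1
--     buckets = {}
--     maxf = 0
--     for c in freq.values():
--         buckets[c] = buckets.get(c, 0) + 1
--         if c > maxf:
--             maxf = c
--     remaining = len(freq)
--     budget = k if k > 0 else 0
--     for f in range(1, maxf + 1):
--         g = buckets.get(f, 0)
--         take = min(g, budget // f)
--         remaining -= take
--         budget -= take * f
--         if take < g:
--             break
--     return remaining
-- ===== Notes on version B (the rewrite author's own statement) =====
-- stated objective: faster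
-- what changed: Replaces the comparison sort of groups plus unit-by-unit decrement of k with a frequency-bucket table scanned once by arithmetic (take = min(bucket, k//f) per frequency), removing both the sort and the per-occurrence inner loop.
import Mathlib
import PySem

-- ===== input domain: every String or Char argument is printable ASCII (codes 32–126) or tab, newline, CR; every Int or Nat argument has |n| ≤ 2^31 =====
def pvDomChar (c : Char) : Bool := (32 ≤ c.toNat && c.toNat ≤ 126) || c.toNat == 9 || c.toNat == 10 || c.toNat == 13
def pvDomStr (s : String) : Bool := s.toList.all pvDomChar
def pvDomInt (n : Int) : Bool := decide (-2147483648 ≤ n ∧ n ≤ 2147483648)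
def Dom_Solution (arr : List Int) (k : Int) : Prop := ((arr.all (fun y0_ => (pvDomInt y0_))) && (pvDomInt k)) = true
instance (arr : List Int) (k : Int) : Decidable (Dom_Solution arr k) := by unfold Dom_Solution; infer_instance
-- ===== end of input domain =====

-- B replaces A's sort-then-unit-decrement removal with a frequency-bucket table consumed by arithmetic (faster).

-- ===== PORT A =====
-- inner 'while item[1] > 0' loop: some k' = loop exhausted the group leaving budget k', none = k ran out (end = True)
def pvInnerA (c k : Int) : Option Int :=
  if h : 0 < c then
    if 0 < k then pvInnerA (c - 1) (k - 1) else none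
  else some k
termination_by c.toNat
decreasing_by omega

-- outer 'for i in range(len(order))' loop; 'none' branch returns output = len(order[i:])
def pvOuterA : List (Int × Int) → Int → Int
  | [], _ => 0
  | p :: rest, k =>
    match pvInnerA p.2 k with
    | some k' => pvOuterA rest k'
    | none => 1 + (rest.length : Int)

def Solution (arr : List Int) (k : Int) : Int :=
  let freq := arr.foldl (fun d i =>
    if d.contains i then d.insert i (d.getD i 0 + 1) else d.insert i 1) PySem.Dict.empty
  let order := PySem.List.sorted freq.items (fun kv => kv.2) false
  pvOuterA order k

-- ===== PORT B =====
-- 'for f in range(1, maxf+1)' with break once a bucket cannot be fully removed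
def pvAltLoop (b : PySem.Dict Int Int) : List Int → Int → Int → Int
  | [], remaining, _ => remaining
  | f :: fs, remaining, budget =>
    let g := b.getD f 0
    let take := min g (PySem.Int.floordiv budget f)
    if take < g then remaining - take
    else pvAltLoop b fs (remaining - take) (budget - take * f)

def Solution_alt (arr : List Int) (k : Int) : Int :=
  let freq := arr.foldl (fun d i => d.insert i (d.getD i 0 + 1)) PySem.Dict.empty
  let bm := freq.values.foldl (fun (bm : PySem.Dict Int Int × Int) c =>
      (bm.1.insert c (bm.1.getD c 0 + 1), if bm.2 < c then c else bm.2)) (PySem.Dict.empty, 0)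
  let budget := if 0 < k then k else 0
  pvAltLoop bm.1 (PySem.List.pyRange 1 (bm.2 + 1) 1) (freq.size : Int) budget

-- ===== PRECONDITION & SPEC =====
def Spec_Solution (arr : List Int) (k : Int) (out : Int) : Prop := out = Solution_alt arr k
instance (arr : List Int) (k : Int) (out : Int) : Decidable (Spec_Solution arr k out) := by unfold Spec_Solution; infer_instance

-- ===== CLAIM (what is proved, stated in full; the proofs are below) =====
def Claim_equal_Solution : Prop := ∀ (arr : List Int) (k : Int), Dom_Solution arr k → Spec_Solution arr k (Solution arr k)

-- ===== LEMMAS AND PROOFS =====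

lemma pvInnerA_char (c k : Int) (hc : 1 ≤ c) :
    pvInnerA c k = if c ≤ k then some (k - c) else none := by
  induction c, k using pvInnerA.induct with
  | case1 c k hc' hk ih =>
    rw [pvInnerA, dif_pos hc', if_pos hk]
    by_cases h1 : 1 ≤ c - 1
    · rw [ih h1]
      split_ifs with h2 h3 h3 <;> first | (congr 1; omega) | omega | rfl
    · -- c = 1
      have hc1 : c = 1 := by omega
      subst hc1
      rw [pvInnerA, dif_neg (by omega : ¬ (0:Int) < 1 - 1), if_pos (by omega : (1:Int) ≤ k)]
  | case2 c k hc' hk =>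
    rw [pvInnerA, dif_pos hc', if_neg hk, if_neg (by omega)]
  | case3 c k hc' => omega

def pvGreedy : List Int → Int → Int
  | [], _ => 0
  | c :: rest, k => if c ≤ k then pvGreedy rest (k - c) else 1 + (rest.length : Int)

lemma pvOuterA_eq_greedy (l : List (Int × Int)) (k : Int) (h : ∀ p ∈ l, 1 ≤ p.2) :
    pvOuterA l k = pvGreedy (l.map (·.2)) k := by
  induction l generalizing k with
  | nil => rfl
  | cons p rest ih =>
    have hp : 1 ≤ p.2 := h p (List.mem_cons_self ..)
    rw [List.map_cons, pvOuterA, pvInnerA_char p.2 k hp, pvGreedy]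
    split_ifs with h2
    · exact ih (k - p.2) (fun q hq => h q (List.mem_cons_of_mem _ hq))
    · simp

lemma pvGreedy_clip (l : List Int) (k : Int) (h : ∀ v ∈ l, 1 ≤ v) :
    pvGreedy l k = pvGreedy l (if 0 < k then k else 0) := by
  split_ifs with hk
  · rfl
  · cases l with
    | nil => rfl
    | cons c rest =>
      have : 1 ≤ c := h c (List.mem_cons_self ..)
      rw [pvGreedy, pvGreedy, if_neg (by omega), if_neg (by omega)]

lemma pvGreedy_replicate_consume (f : Int) (hf : 0 < f) (g : Nat) (rest : List Int) (k : Int)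
    (hk : (g : Int) * f ≤ k) :
    pvGreedy (List.replicate g f ++ rest) k = pvGreedy rest (k - g * f) := by
  induction g generalizing k with
  | zero => simp
  | succ n ih =>
    rw [List.replicate_succ, List.cons_append, pvGreedy,
      if_pos (by push_cast at hk ⊢; nlinarith), ih (k - f) (by push_cast at hk ⊢; nlinarith)]
    congr 1
    push_cast
    ring

lemma pvGreedy_replicate_stop (f : Int) (hf : 0 < f) (g : Nat) (rest : List Int) (k : Int)
    (hk0 : 0 ≤ k) (hk : k < (g : Int) * f) :
    pvGreedy (List.replicate g f ++ rest) k = (g : Int) - k / f + rest.length := by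
  induction g generalizing k with
  | zero => simp at hk; omega
  | succ n ih =>
    rw [List.replicate_succ, List.cons_append, pvGreedy]
    by_cases hfk : f ≤ k
    · rw [if_pos hfk, ih (k - f) (by omega) (by push_cast at hk ⊢; nlinarith)]
      have : (k - f) / f = k / f - 1 := by
        have := Int.add_mul_ediv_right k (-1) (by omega : f ≠ 0)
        simpa [sub_eq_add_neg, neg_mul] using this
      rw [this]; push_cast; ring
    · rw [if_neg hfk]
      have : k / f = 0 := Int.ediv_eq_zero_of_lt hk0 (by omega)
      rw [this]
      simp [List.length_append]
      ring

lemma pvAltLoop_eq_greedy (vals : List Int) (fs : List Int) (budget : Int)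
    (hb : 0 ≤ budget) (hfs : ∀ f ∈ fs, 0 < f) :
    pvAltLoop (PySem.Dict.counter vals) fs
      ((fs.flatMap (fun f => List.replicate (vals.count f) f)).length : Int) budget
    = pvGreedy (fs.flatMap (fun f => List.replicate (vals.count f) f)) budget := by
  induction fs generalizing budget with
  | nil => simp [pvAltLoop, pvGreedy]
  | cons f fs ih =>
    have hf : 0 < f := hfs f (List.mem_cons_self ..)
    have hg : (PySem.Dict.counter vals).getD f 0 = (vals.count f : Int) :=
      PySem.Dict.getD_counter ..
    rw [pvAltLoop]
    simp only [hg, PySem.Int.floordiv_eq_ediv_of_pos hf]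
    rw [List.flatMap_cons, List.length_append, List.length_replicate]
    by_cases hcase : (vals.count f : Int) * f ≤ budget
    · have hle : (vals.count f : Int) ≤ budget / f := (Int.le_ediv_iff_mul_le hf).2 hcase
      rw [min_eq_left hle, if_neg (by omega)]
      rw [pvGreedy_replicate_consume f hf (vals.count f) _ budget hcase]
      have := ih (budget - (vals.count f : Int) * f) (by omega)
        (fun q hq => hfs q (List.mem_cons_of_mem _ hq))
      rw [← this]
      congr 1
      push_cast; ring
    · have hlt : budget / f < (vals.count f : Int) := by
        by_contra hh
        exact hcase ((Int.le_ediv_iff_mul_le hf).1 (by omega))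
      rw [min_eq_right (by omega), if_pos hlt]
      rw [pvGreedy_replicate_stop f hf (vals.count f) _ budget hb (by omega)]
      push_cast; ring

lemma countA_eq_counter (arr : List Int) :
    arr.foldl (fun d i =>
      if d.contains i then d.insert i (d.getD i 0 + 1) else d.insert i 1) PySem.Dict.empty
    = PySem.Dict.counter arr := by
  rw [← PySem.Dict.foldl_insert_getD_add_one_eq_counter]
  congr 1
  funext d i
  by_cases h : d.contains i
  · rw [if_pos h]
  · rw [if_neg h, PySem.Dict.getD_of_not_contains _ 0 (by simpa using h)]; norm_num

lemma pairfold (l : List Int) (d : PySem.Dict Int Int) (m : Int) :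
    l.foldl (fun (bm : PySem.Dict Int Int × Int) c =>
      (bm.1.insert c (bm.1.getD c 0 + 1), if bm.2 < c then c else bm.2)) (d, m)
    = (l.foldl (fun d c => d.insert c (d.getD c 0 + 1)) d,
       l.foldl (fun m c => if m < c then c else m) m) := by
  induction l generalizing d m with
  | nil => rfl
  | cons c l ih => simp [List.foldl_cons, ih]

lemma maxfold_ge (l : List Int) (m : Int) :
    m ≤ l.foldl (fun m c => if m < c then c else m) m ∧
    ∀ v ∈ l, v ≤ l.foldl (fun m c => if m < c then c else m) m := by
  induction l generalizing m with
  | nil => simp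
  | cons c l ih =>
    have h1 := ih (if m < c then c else m)
    constructor
    · refine le_trans ?_ h1.1
      split_ifs with h <;> omega
    · intro v hv
      rcases List.mem_cons.1 hv with rfl | hv
      · refine le_trans ?_ h1.1
        split_ifs with h <;> omega
      · exact h1.2 v hv

lemma map_snd_sorted_items (items : List (Int × Int)) :
    (PySem.List.sorted items (fun kv => kv.2) false).map (·.2)
    = PySem.List.sorted (items.map (·.2)) (fun x => x) false := by
  apply PySem.List.eq_of_perm_of_pairwise_le_of_injective (fun x : Int => x)
    (fun a b h => h)
  · exact ((PySem.List.sorted_perm ..).map _).trans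
      (PySem.List.sorted_perm ..).symm
  · exact PySem.List.sorted_map_key_pairwise ..
  · exact PySem.List.sorted_pairwise ..

lemma vals_pos (arr : List Int) :
    ∀ v ∈ (PySem.Dict.counter arr).values, 1 ≤ v := by
  intro v hv
  have : (PySem.Dict.counter arr).values
      = (PySem.Set.ofList arr).map (fun x => (arr.count x : Int)) := by
    show ((PySem.Dict.counter arr).items).map (·.2) = _
    rw [PySem.Dict.items_counter]
    simp
  rw [this] at hv
  obtain ⟨x, hx, rfl⟩ := List.mem_map.1 hv
  have : x ∈ arr := (PySem.Set.mem_ofList ..).1 hx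
  have := List.count_pos_iff.2 this
  omega

lemma count_flatMap_replicate (fs : List Int) (cnt : Int → Nat) (x : Int) (hnd : fs.Nodup) :
    (fs.flatMap (fun f => List.replicate (cnt f) f)).count x
    = if x ∈ fs then cnt x else 0 := by
  induction fs with
  | nil => simp
  | cons f fs ih =>
    rw [List.flatMap_cons, List.count_append, List.count_replicate,
      ih (List.nodup_cons.1 hnd).2]
    have hf : f ∉ fs := (List.nodup_cons.1 hnd).1
    by_cases hx : x = f
    · subst hx
      simp [hf]
    · simp [hx, Ne.symm hx, List.mem_cons]

lemma counting_sort (vals : List Int) (maxf : Int)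
    (h1 : ∀ v ∈ vals, 1 ≤ v) (h2 : ∀ v ∈ vals, v ≤ maxf) :
    PySem.List.sorted vals (fun x => x) false
    = (PySem.List.pyRange 1 (maxf + 1) 1).flatMap (fun f => List.replicate (vals.count f) f) := by
  apply PySem.List.sorted_id_eq_of_perm_of_pairwise
  · rw [List.perm_iff_count]
    intro x
    rw [count_flatMap_replicate _ _ _ (PySem.List.nodup_pyRange_one _ _)]
    by_cases hx : x ∈ PySem.List.pyRange 1 (maxf + 1) 1
    · simp [hx]
    · rw [if_neg hx, eq_comm, List.count_eq_zero]
      intro hmem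
      exact hx ((PySem.List.mem_pyRange_one ..).2 ⟨h1 x hmem, by have := h2 x hmem; omega⟩)
  · rw [List.flatMap_def, List.pairwise_flatten]
    refine ⟨fun l hl => ?_, ?_⟩
    · obtain ⟨f, _, rfl⟩ := List.mem_map.1 hl
      exact List.pairwise_replicate.2 (Or.inr le_rfl)
    · refine List.Pairwise.map _ ?_ (PySem.List.pairwise_lt_pyRange_one _ _)
      intro a b hab x hx y hy
      rw [List.eq_of_mem_replicate hx, List.eq_of_mem_replicate hy]
      omega

theorem pvSolution_eq (arr : List Int) (k : Int) : Solution arr k = Solution_alt arr k := by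
  have hvals := vals_pos arr
  have hmax := maxfold_ge (PySem.Dict.counter arr).values 0
  set vals := (PySem.Dict.counter arr).values with hvals_def
  set maxf := vals.foldl (fun m c => if m < c then c else m) 0 with hmaxf_def
  have h2 : ∀ v ∈ vals, v ≤ maxf := hmax.2
  have hE := counting_sort vals maxf hvals h2
  set E := (PySem.List.pyRange 1 (maxf + 1) 1).flatMap
    (fun f => List.replicate (vals.count f) f) with hE_def
  set budget := if 0 < k then k else 0 with hbudget_def
  have hb0 : 0 ≤ budget := by rw [hbudget_def]; split_ifs <;> omega
  -- A side
  have hA : Solution arr k = pvGreedy E budget := by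
    show pvOuterA (PySem.List.sorted (arr.foldl (fun d i =>
      if d.contains i then d.insert i (d.getD i 0 + 1) else d.insert i 1)
      PySem.Dict.empty).items (fun kv => kv.2) false) k = _
    rw [countA_eq_counter]
    rw [pvOuterA_eq_greedy _ k (by
      intro p hp
      have hp' : p ∈ (PySem.Dict.counter arr).items := (PySem.List.mem_sorted ..).1 hp
      exact hvals p.2 (List.mem_map.2 ⟨p, hp', rfl⟩))]
    rw [map_snd_sorted_items]
    have hm : (PySem.Dict.counter arr).items.map (·.2) = vals := rfl
    rw [hm, hE]
    exact pvGreedy_clip E k (by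
      intro v hv
      rw [← hE] at hv
      exact hvals v ((PySem.List.mem_sorted ..).1 hv))
  -- B side
  have hB : Solution_alt arr k = pvGreedy E budget := by
    simp only [Solution_alt, PySem.Dict.foldl_insert_getD_add_one_eq_counter, pairfold]
    rw [← hvals_def, ← hmaxf_def, ← hbudget_def]
    have hsize : ((PySem.Dict.counter arr).size : Int) = (E.length : Int) := by
      have hlen : E.length = vals.length := by
        rw [← hE]
        exact PySem.List.length_sorted ..
      rw [hlen, hvals_def]
      simp [PySem.Dict.size, PySem.Dict.values]
    rw [hsize]
    exact pvAltLoop_eq_greedy vals _ budget hb0 (by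
      intro f hf
      have := (PySem.List.mem_pyRange_one ..).1 hf
      omega)
  rw [hA, hB]

-- ===== VERDICT (by name: the statement is the Claim_ definition above) =====
theorem Solution_spec : Claim_equal_Solution := by
  intro arr k _
  exact pvSolution_eq arr k
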